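-- pv_equiv track=rewrite | github.com/csgear/competitive | leetcode/python/p1769.py | minOperationsn2
-- ===== SOURCE A (Python) =====
-- from typing import List
--
-- def minOperationsn2(boxes: str) -> List[int]:
--     n = len(boxes)
--     res = [0] * n
--     for i in range(n):
--         for j in range(n):
--             if boxes[j] == '1':
--                 res[i] += abs(i - j)
--     return res
-- ===== SOURCE B (Python) =====
-- from typing import List
--
-- def minOperationsn2(boxes: str) -> List[int]:
--     # O(n): one forward pass and one backward pass with running (count, cost),
--     # then combine; equals sum of |i-j| over all j with boxes[j]=='1'.
--     def pass_costs(cs):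
--         out = []
--         cnt = 0
--         cost = 0
--         for c in cs:
--             cost += cnt
--             out.append(cost)
--             if c == '1':
--                 cnt += 1
--         return out
--
--     left = pass_costs(boxes)
--     right = pass_costs(reversed(boxes))
--     right.reverse()
--     return [l + r for l, r in zip(left, right)]
-- ===== Notes on version B (the rewrite author's own statement) =====
-- stated objective: faster
-- what changed: Replaced the O(n^2) double loop over all (i,j) pairs by two linear passes (forward and backward) that carry a running count of seen '1's and an accumulated cost, combined by elementwise addition.
import Mathlib
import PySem

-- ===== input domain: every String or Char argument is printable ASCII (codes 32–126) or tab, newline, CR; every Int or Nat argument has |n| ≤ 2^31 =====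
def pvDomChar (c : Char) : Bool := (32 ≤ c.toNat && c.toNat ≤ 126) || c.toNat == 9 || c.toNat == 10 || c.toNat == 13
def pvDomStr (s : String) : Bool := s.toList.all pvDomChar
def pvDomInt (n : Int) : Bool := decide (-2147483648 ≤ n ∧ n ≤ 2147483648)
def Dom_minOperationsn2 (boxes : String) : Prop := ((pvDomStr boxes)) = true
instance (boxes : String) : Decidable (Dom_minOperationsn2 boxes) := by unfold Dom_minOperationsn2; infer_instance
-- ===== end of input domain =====

-- B replaces A's O(n^2) all-pairs double loop by two linear count/cost passes; objective: faster (asymptotic).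

-- ===== PORT A =====
-- for i in range(n): for j in range(n): if boxes[j]=='1': res[i] += abs(i-j)
-- boxes[j] with 0 ≤ j < n is always in range, so `getD j ' '` is exact here.
def minOperationsn2 (boxes : String) : List Int :=
  let cs := boxes.toList
  let n := cs.length
  (List.range n).foldl
    (fun res i =>
      (List.range n).foldl
        (fun res j =>
          if cs.getD j ' ' = '1' then
            res.set i (res.getD i 0 + |(i : Int) - (j : Int)|)
          else res)
        res)
    (List.replicate n (0 : Int))

-- ===== PORT B =====
-- pass_costs: running count of '1's seen and accumulated cost; appends cost for each char.
def passCosts : List Char → Int → Int → List Int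
  | [], _, _ => []
  | c :: cs, cnt, cost =>
    let cost' := cost + cnt
    cost' :: passCosts cs (if c = '1' then cnt + 1 else cnt) cost'

def minOperationsn2_alt (boxes : String) : List Int :=
  let cs := boxes.toList
  let left := passCosts cs 0 0
  let right := (passCosts cs.reverse 0 0).reverse
  List.zipWith (· + ·) left right

-- ===== PRECONDITION & SPEC =====
def Spec_minOperationsn2 (boxes : String) (out : List Int) : Prop := out = minOperationsn2_alt boxes
instance (boxes : String) (out : List Int) : Decidable (Spec_minOperationsn2 boxes out) := by unfold Spec_minOperationsn2; infer_instance

-- ===== CLAIM (what is proved, stated in full; the proofs are below) =====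
def Claim_equal_minOperationsn2 : Prop := ∀ (boxes : String), Dom_minOperationsn2 boxes → Spec_minOperationsn2 boxes (minOperationsn2 boxes)

-- ===== LEMMAS AND PROOFS =====

-- total cost at index k: sum over all j of |k - j| for '1' positions j
def pvS (cs : List Char) (k : Nat) : Int :=
  ∑ j ∈ Finset.range cs.length, if cs.getD j ' ' = '1' then |(k : Int) - (j : Int)| else 0

-- one-sided cost: '1' positions strictly left of k, weighted by distance
def pvT (cs : List Char) (k : Nat) : Int :=
  ∑ j ∈ Finset.range k, if cs.getD j ' ' = '1' then ((k : Int) - (j : Int)) else 0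

lemma pvT_succ (c : Char) (cs : List Char) (k : Nat) :
    pvT (c :: cs) (k + 1) = (if c = '1' then ((k : Int) + 1) else 0) + pvT cs k := by
  unfold pvT
  rw [Finset.sum_range_succ']
  simp only [List.getD_cons_succ, List.getD_cons_zero, Nat.cast_zero, Nat.cast_add, Nat.cast_one]
  rw [add_comm]
  congr 1
  apply Finset.sum_congr rfl
  intro j _
  split_ifs with h
  · ring
  · rfl

lemma passCosts_length (cs : List Char) (cnt cost : Int) :
    (passCosts cs cnt cost).length = cs.length := by
  induction cs generalizing cnt cost with
  | nil => rfl
  | cons c cs ih => simp [passCosts, ih]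

lemma passCosts_getElem? (cs : List Char) (cnt cost : Int) (k : Nat) (hk : k < cs.length) :
    (passCosts cs cnt cost)[k]? = some (cost + cnt * ((k : Int) + 1) + pvT cs k) := by
  induction cs generalizing cnt cost k with
  | nil => simp at hk
  | cons c cs ih =>
    cases k with
    | zero => simp [passCosts, pvT]
    | succ k =>
      simp only [passCosts, List.getElem?_cons_succ]
      rw [ih _ _ k (by simpa using hk), pvT_succ]
      congr 1
      split_ifs <;> push_cast <;> ring

-- the inner j-loop of A only touches index i: it is a single set
lemma innerA (cs : List Char) (i : Nat) (L : List Nat) (res : List Int) (hi : i < res.length) :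
    L.foldl
      (fun res j =>
        if cs.getD j ' ' = '1' then
          res.set i (res.getD i 0 + |(i : Int) - (j : Int)|)
        else res) res
    = res.set i (res.getD i 0 +
        (L.map (fun j => if cs.getD j ' ' = '1' then |(i : Int) - (j : Int)| else 0)).sum) := by
  induction L generalizing res with
  | nil =>
    simp only [List.foldl_nil, List.map_nil, List.sum_nil, add_zero]
    rw [List.getD_eq_getElem res 0 hi]
    exact (List.set_getElem_self hi).symm
  | cons j L ih =>
    simp only [List.foldl_cons, List.map_cons, List.sum_cons]
    by_cases h : cs.getD j ' ' = '1'
    · rw [if_pos h, if_pos h, ih _ (by simpa using hi)]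
      rw [List.set_set]
      congr 1
      · have : (res.set i (res.getD i 0 + |(i : Int) - (j : Int)|)).getD i 0
            = res.getD i 0 + |(i : Int) - (j : Int)| := by
          simp [List.getD, List.getElem?_set_self (by simpa using hi)]
        rw [this]; ring
    · rw [if_neg h, if_neg h, ih _ hi]
      congr 1; ring

-- the outer i-loop, pointwise: index k is set (once) iff k ∈ L
lemma outerA (cs : List Char) (L : List Nat) (res : List Int)
    (hL : ∀ i ∈ L, i < res.length) (hnd : L.Nodup) (k : Nat) (hk : k < res.length) :
    (L.foldl
      (fun res i =>
        (List.range cs.length).foldl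
          (fun res j =>
            if cs.getD j ' ' = '1' then
              res.set i (res.getD i 0 + |(i : Int) - (j : Int)|)
            else res) res) res)[k]?
    = if k ∈ L then some (res.getD k 0 + pvS cs k) else res[k]? := by
  induction L generalizing res with
  | nil => simp
  | cons i L ih =>
    have hi : i < res.length := hL i (List.mem_cons_self ..)
    simp only [List.foldl_cons]
    rw [innerA cs i _ res hi]
    have hsum : (List.map (fun j => if cs.getD j ' ' = '1' then |(i : Int) - (j : Int)| else 0)
        (List.range cs.length)).sum = pvS cs i := by
      unfold pvS; rfl
    rw [hsum]
    set res1 := res.set i (res.getD i 0 + pvS cs i) with hres1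
    have hlen1 : res1.length = res.length := by simp [hres1]
    rw [ih res1 (by intro x hx; rw [hlen1]; exact hL x (List.mem_cons_of_mem _ hx))
        hnd.of_cons (by rw [hlen1]; exact hk)]
    by_cases hki : k = i
    · subst hki
      have hkL : k ∉ L := (List.nodup_cons.mp hnd).1
      simp only [hkL, if_pos (List.mem_cons_self ..)]
      simp [hres1, List.getElem?_set_self (by simpa using hi)]
    · have hmem : (k ∈ i :: L) ↔ (k ∈ L) := by simp [List.mem_cons, hki]
      by_cases hkL : k ∈ L
      · rw [if_pos hkL, if_pos (hmem.mpr hkL)]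
        have : res1.getD k 0 = res.getD k 0 := by
          simp [hres1, List.getD, List.getElem?_set_ne (Ne.symm hki)]
        rw [this]
      · rw [if_neg hkL, if_neg (fun h => hkL (hmem.mp h))]
        simp [hres1, List.getElem?_set_ne (Ne.symm hki)]

-- the composite fold preserves the length of res
lemma foldA_length (cs : List Char) (L : List Nat) (res : List Int) :
    (L.foldl
      (fun res i =>
        (List.range cs.length).foldl
          (fun res j =>
            if cs.getD j ' ' = '1' then
              res.set i (res.getD i 0 + |(i : Int) - (j : Int)|)
            else res) res) res).length = res.length := by
  induction L generalizing res with
  | nil => rfl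
  | cons i L ih =>
    simp only [List.foldl_cons]
    rw [ih]
    induction (List.range cs.length) generalizing res with
    | nil => rfl
    | cons j J ihJ =>
      simp only [List.foldl_cons]
      rw [ihJ]
      split_ifs <;> simp

-- A computes the full-distance sums
lemma A_char (boxes : String) :
    minOperationsn2 boxes = (List.range boxes.toList.length).map (fun k => pvS boxes.toList k) := by
  unfold minOperationsn2
  set cs := boxes.toList
  set n := cs.length with hn
  apply List.ext_getElem?
  intro k
  by_cases hk : k < n
  · rw [outerA cs (List.range n) (List.replicate n (0 : Int))
        (by intro i hi; simpa using List.mem_range.mp hi) (List.nodup_range)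
        k (by simpa using hk)]
    rw [if_pos (List.mem_range.mpr hk)]
    simp [hk]
  · rw [List.getElem?_eq_none (by rw [foldA_length]; simp; omega),
        List.getElem?_eq_none (by simp; omega)]

-- the full sum at k splits into the left pass plus the reflected right pass
lemma split_S (cs : List Char) (k : Nat) (hk : k < cs.length) :
    pvS cs k = pvT cs k + pvT cs.reverse (cs.length - 1 - k) := by
  set n := cs.length with hn
  have hrev : ∀ j, j < n - 1 - k →
      (cs.reverse.getD j ' ' = cs.getD (n - 1 - j) ' ') := by
    intro j hj
    have hjn : j < n := by omega
    rw [List.getD_eq_getElem cs.reverse ' ' (by simpa using hjn),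
        List.getD_eq_getElem cs ' ' (by omega)]
    rw [List.getElem_reverse]
  have hT2 : pvT cs.reverse (n - 1 - k)
      = ∑ j ∈ Finset.range (n - 1 - k),
          if cs.getD (k + 1 + j) ' ' = '1' then ((j : Int) + 1) else 0 := by
    unfold pvT
    rw [← Finset.sum_range_reflect]
    apply Finset.sum_congr rfl
    intro j hj
    have hj' := Finset.mem_range.mp hj
    rw [hrev (n - 1 - k - 1 - j) (by omega)]
    have e1 : n - 1 - (n - 1 - k - 1 - j) = k + 1 + j := by omega
    rw [e1]
    split_ifs with h
    · have : ((n - 1 - k : Nat) : Int) - ((n - 1 - k - 1 - j : Nat) : Int) = (j : Int) + 1 := by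
        omega
      rw [this]
    · rfl
  rw [hT2]
  unfold pvS pvT
  have hsplit : cs.length = k + ((n - 1 - k) + 1) := by omega
  conv_lhs => rw [hsplit, Finset.sum_range_add, Finset.sum_range_succ']
  have hz : (if cs.getD (k + 0) ' ' = '1' then |(k : Int) - ((k + 0 : Nat) : Int)| else 0) = 0 := by
    split_ifs <;> simp
  rw [hz, add_zero]
  congr 1
  · apply Finset.sum_congr rfl
    intro j hj
    have hj' := Finset.mem_range.mp hj
    split_ifs with h
    · have : |(k : Int) - (j : Int)| = (k : Int) - (j : Int) := by
        rw [abs_of_nonneg]; omega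
      rw [this]
    · rfl
  · apply Finset.sum_congr rfl
    intro j _
    have e2 : k + (j + 1) = k + 1 + j := by omega
    rw [e2]
    split_ifs with h
    · have : |(k : Int) - ((k + 1 + j : Nat) : Int)| = (j : Int) + 1 := by
        rw [abs_sub_comm, abs_of_nonneg] <;> push_cast <;> omega
      rw [this]
    · rfl

-- B computes the same sums
lemma B_char (boxes : String) :
    minOperationsn2_alt boxes = (List.range boxes.toList.length).map (fun k => pvS boxes.toList k) := by
  unfold minOperationsn2_alt
  set cs := boxes.toList
  set n := cs.length with hn
  apply List.ext_getElem?
  intro k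
  by_cases hk : k < n
  · have hleft : (passCosts cs 0 0)[k]? = some (pvT cs k) := by
      rw [passCosts_getElem? cs 0 0 k hk]; ring_nf
    have hrlen : (passCosts cs.reverse 0 0).length = n := by
      rw [passCosts_length]; simp [hn]
    have hright : ((passCosts cs.reverse 0 0).reverse)[k]? = some (pvT cs.reverse (n - 1 - k)) := by
      rw [List.getElem?_reverse (by rw [hrlen]; exact hk), hrlen]
      rw [passCosts_getElem? cs.reverse 0 0 (n - 1 - k) (by simp [hn]; omega)]
      ring_nf
    rw [List.getElem?_zipWith, hleft, hright]
    simp only [List.getElem?_map]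
    rw [List.getElem?_range hk]
    simp only [Option.map_some]
    rw [split_S cs k hk]
  · rw [List.getElem?_eq_none, List.getElem?_eq_none]
    · simp; omega
    · rw [List.length_zipWith, passCosts_length, List.length_reverse, passCosts_length]
      simp; omega

-- ===== VERDICT (by name: the statement is the Claim_ definition above) =====
theorem minOperationsn2_spec : Claim_equal_minOperationsn2 := by
  intro boxes _
  unfold Spec_minOperationsn2
  rw [A_char, B_char]
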